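-- pv_equiv track=rewrite | github.com/space-cap/final-team3-ai-v2 | app/tools/policy_tools.py | _estimate_effort
-- ===== SOURCE A (Python) =====
-- from typing import Dict, Any, List, Optional, Tuple
--
-- def _estimate_effort(violations: List[Dict]) -> str:
--     """작업량 추정"""
--     critical_count = len([v for v in violations if v.get("severity") == "critical"])
--     major_count = len([v for v in violations if v.get("severity") == "major"])
--     minor_count = len([v for v in violations if v.get("severity") == "minor"])
--
--     total_score = critical_count * 3 + major_count * 2 + minor_count * 1
--
--     if total_score == 0:
--         return "작업 불필요 - 이미 정책을 준수합니다"
--     elif total_score <= 3: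
--         return "소규모 작업 - 5-10분 소요 예상"
--     elif total_score <= 8:
--         return "중간 규모 작업 - 15-30분 소요 예상"
--     else:
--         return "대규모 작업 - 1시간 이상 소요 예상"
-- ===== SOURCE B (Python) =====
-- def _estimate_effort(violations):
--     """작업량 추정"""
--     weights = {"critical": 3, "major": 2, "minor": 1}
--     total_score = 0
--     for v in violations:
--         total_score += weights.get(v.get("severity"), 0)
--
--     if total_score == 0:
--         return "작업 불필요 - 이미 정책을 준수합니다"
--     elif total_score <= 3:
--         return "소규모 작업 - 5-10분 소요 예상"
--     elif total_score <= 8: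
--         return "중간 규모 작업 - 15-30분 소요 예상"
--     else:
--         return "대규모 작업 - 1시간 이상 소요 예상"
-- ===== Notes on version B (the rewrite author's own statement) =====
-- stated objective: simpler
-- what changed: Replaces the three separate count comprehensions over violations by a single pass that accumulates the score via a severity->weight table lookup.
import Mathlib
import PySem

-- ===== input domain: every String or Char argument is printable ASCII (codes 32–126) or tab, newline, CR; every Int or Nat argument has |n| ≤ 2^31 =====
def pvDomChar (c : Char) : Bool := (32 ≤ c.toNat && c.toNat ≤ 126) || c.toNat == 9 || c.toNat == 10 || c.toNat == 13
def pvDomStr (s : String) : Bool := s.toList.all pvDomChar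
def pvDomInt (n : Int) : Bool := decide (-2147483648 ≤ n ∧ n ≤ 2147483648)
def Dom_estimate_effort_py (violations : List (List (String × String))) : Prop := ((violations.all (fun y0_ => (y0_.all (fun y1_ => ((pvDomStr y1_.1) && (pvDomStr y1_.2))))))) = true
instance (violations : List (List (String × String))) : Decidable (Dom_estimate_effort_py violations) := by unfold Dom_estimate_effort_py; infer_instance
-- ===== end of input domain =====

-- B changes the decomposition only (one accumulating pass with a weight table instead of three count comprehensions); same return value.

-- ===== PORT A =====
-- A: three count comprehensions, then the threshold cascade.
def estimate_effort_py (violations : List (List (String × String))) : String :=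
  let critical_count : Int :=
    (violations.filter (fun v => (PySem.Dict.mk v).get? "severity" == some "critical")).length
  let major_count : Int :=
    (violations.filter (fun v => (PySem.Dict.mk v).get? "severity" == some "major")).length
  let minor_count : Int :=
    (violations.filter (fun v => (PySem.Dict.mk v).get? "severity" == some "minor")).length
  let total_score : Int := critical_count * 3 + major_count * 2 + minor_count * 1
  if total_score == 0 then "작업 불필요 - 이미 정책을 준수합니다"
  else if total_score ≤ 3 then "소규모 작업 - 5-10분 소요 예상"
  else if total_score ≤ 8 then "중간 규모 작업 - 15-30분 소요 예상"
  else "대규모 작업 - 1시간 이상 소요 예상"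

-- ===== PORT B =====
-- B's weights.get(sev, 0): the literal dict {"critical":3,"major":2,"minor":1} looked up with default 0.
-- key is v.get("severity") : Option String; a None key misses every string key, exactly as in Python.
def pvWeightGet (sev : Option String) : Int :=
  (PySem.Dict.mk [(some "critical", (3:Int)), (some "major", 2), (some "minor", 1)]).getD sev 0

def estimate_effort_py_alt (violations : List (List (String × String))) : String :=
  let total_score : Int :=
    violations.foldl (fun acc v => acc + pvWeightGet ((PySem.Dict.mk v).get? "severity")) 0
  if total_score == 0 then "작업 불필요 - 이미 정책을 준수합니다"
  else if total_score ≤ 3 then "소규모 작업 - 5-10분 소요 예상"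
  else if total_score ≤ 8 then "중간 규모 작업 - 15-30분 소요 예상"
  else "대규모 작업 - 1시간 이상 소요 예상"

-- ===== PRECONDITION & SPEC =====
def Spec_estimate_effort_py (violations : List (List (String × String))) (out : String) : Prop := out = estimate_effort_py_alt violations
instance (violations : List (List (String × String))) (out : String) : Decidable (Spec_estimate_effort_py violations out) := by unfold Spec_estimate_effort_py; infer_instance

-- ===== CLAIM (what is proved, stated in full; the proofs are below) =====
def Claim_equal_estimate_effort_py : Prop := ∀ (violations : List (List (String × String))), Dom_estimate_effort_py violations → Spec_estimate_effort_py violations (estimate_effort_py violations)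

-- ===== LEMMAS AND PROOFS =====

-- the two scores agree
theorem pv_score_eq (violations : List (List (String × String))) (acc : Int) :
    violations.foldl (fun acc v => acc + pvWeightGet ((PySem.Dict.mk v).get? "severity")) acc =
    acc +
    ((violations.filter (fun v => (PySem.Dict.mk v).get? "severity" == some "critical")).length * 3 +
     (violations.filter (fun v => (PySem.Dict.mk v).get? "severity" == some "major")).length * 2 +
     (violations.filter (fun v => (PySem.Dict.mk v).get? "severity" == some "minor")).length * 1) := by
  induction violations generalizing acc with
  | nil => simp
  | cons v vs ih =>
    simp only [List.foldl_cons, List.filter_cons, ih]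
    have hw0 : pvWeightGet none = 0 := rfl
    have hwc : pvWeightGet (some "critical") = 3 := rfl
    have hwm : pvWeightGet (some "major") = 2 := rfl
    have hwn : pvWeightGet (some "minor") = 1 := rfl
    rcases h : (PySem.Dict.mk v).get? "severity" with _ | s
    · simp [hw0]
    · by_cases hc : s = "critical"
      · subst hc; simp [hwc]; ring
      · by_cases hm : s = "major"
        · subst hm; simp [hwm]; ring
        · by_cases hn : s = "minor"
          · subst hn; simp [hwn]; ring
          · have hw : pvWeightGet (some s) = 0 := by
              have c1 : ("critical" == s) = false := beq_eq_false_iff_ne.mpr (Ne.symm hc)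
              have c2 : ("major" == s) = false := beq_eq_false_iff_ne.mpr (Ne.symm hm)
              have c3 : ("minor" == s) = false := beq_eq_false_iff_ne.mpr (Ne.symm hn)
              simp [pvWeightGet, PySem.Dict.getD, PySem.Dict.get?, List.find?, c1, c2, c3]
            simp [hw, hc, hm, hn]

-- ===== VERDICT (by name: the statement is the Claim_ definition above) =====
theorem estimate_effort_py_spec : Claim_equal_estimate_effort_py := by
  intro violations _
  unfold Spec_estimate_effort_py estimate_effort_py estimate_effort_py_alt
  rw [pv_score_eq]
  simp
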